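-- pv_equiv track=rewrite | github.com/SKaplanOfficial/Aria | cmds/search.py | check_if_url
-- ===== SOURCE A (Python) =====
-- def check_if_url(term):
--     if "http" in term or "www." in term:
--         return True
--
--     tlds = [".com", ".net", ".org", ".io", ".de", ".uk", ".xyz", ".gov", ".tk", ".nl", ".ca", ".uk"]
--
--     for tld in tlds:
--         if tld in term:
--             return True
--     return False
-- ===== SOURCE B (Python) =====
-- MARKERS = ("http", "www.", ".com", ".net", ".org", ".io", ".de", ".uk",
--            ".xyz", ".gov", ".tk", ".nl", ".ca")
--
--
-- def check_if_url(term):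
--     # Single left-to-right scan: at each position, test whether any marker
--     # starts there, instead of one full substring search per marker.
--     for i in range(len(term)):
--         for m in MARKERS:
--             if term.startswith(m, i):
--                 return True
--     return False
-- ===== Notes on version B (the rewrite author's own statement) =====
-- stated objective: alternative
-- what changed: Replaces the short-circuit guard plus the per-TLD substring loop with a single left-to-right position scan that tests at each index whether any of the thirteen distinct markers starts there.
import Mathlib
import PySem

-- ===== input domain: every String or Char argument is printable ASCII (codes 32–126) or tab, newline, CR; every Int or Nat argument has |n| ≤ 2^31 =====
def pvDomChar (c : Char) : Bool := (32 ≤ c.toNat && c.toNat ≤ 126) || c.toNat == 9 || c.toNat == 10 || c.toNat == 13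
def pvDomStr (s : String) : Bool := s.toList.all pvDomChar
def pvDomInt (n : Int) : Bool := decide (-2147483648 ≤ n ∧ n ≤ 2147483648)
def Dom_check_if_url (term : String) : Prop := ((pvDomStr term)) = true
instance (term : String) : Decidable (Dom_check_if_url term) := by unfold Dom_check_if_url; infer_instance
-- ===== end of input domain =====

-- B is an alternative implementation: one left-to-right position scan testing all
-- markers at each index, instead of A's guard plus one full substring search per TLD.

-- ===== PORT A =====
-- the for-loop over tlds with early 'return True'
def pvLoopA : List String → String → Bool
  | [], _ => false
  | t :: rest, term => if PySem.Str.isIn t term then true else pvLoopA rest term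

def check_if_url (term : String) : Bool :=
  if PySem.Str.isIn "http" term || PySem.Str.isIn "www." term then true
  else
    pvLoopA [".com", ".net", ".org", ".io", ".de", ".uk", ".xyz", ".gov", ".tk", ".nl", ".ca", ".uk"] term

-- ===== PORT B =====
def pvMarkers : List (List Char) :=
  ["http".toList, "www.".toList, ".com".toList, ".net".toList, ".org".toList,
   ".io".toList, ".de".toList, ".uk".toList, ".xyz".toList, ".gov".toList,
   ".tk".toList, ".nl".toList, ".ca".toList]

-- the 'for i in range(len(term))' loop: recursion over the successive suffixes;
-- term.startswith(m, i) is m.isPrefixOf (the suffix starting at i)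
def pvScanB : List Char → Bool
  | [] => false
  | c :: rest => if pvMarkers.any (fun m => m.isPrefixOf (c :: rest)) then true else pvScanB rest

def check_if_url_alt (term : String) : Bool := pvScanB term.toList

-- ===== PRECONDITION & SPEC =====
def Spec_check_if_url (term : String) (out : Bool) : Prop := out = check_if_url_alt term
instance (term : String) (out : Bool) : Decidable (Spec_check_if_url term out) := by unfold Spec_check_if_url; infer_instance

-- ===== CLAIM (what is proved, stated in full; the proofs are below) =====
def Claim_equal_check_if_url : Prop := ∀ (term : String), Dom_check_if_url term → Spec_check_if_url term (check_if_url term)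

-- ===== LEMMAS AND PROOFS =====

theorem strIsIn_iff (sub s : String) :
    PySem.Str.isIn sub s = true ↔ sub.toList <:+: s.toList := by
  rw [PySem.Str.isIn_eq]; exact PySem.Chars.isIn_iff_infix _ _

theorem pvScanB_iff (l : List Char) : pvScanB l = true ↔ ∃ m ∈ pvMarkers, m <:+: l := by
  induction l with
  | nil =>
    constructor
    · intro h; exact absurd h (by decide)
    · rintro ⟨m, hm, hinf⟩
      have hnil : m = [] := List.eq_nil_of_infix_nil hinf
      subst hnil
      exact absurd hm (by decide)
  | cons c rest ih =>
    unfold pvScanB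
    by_cases h : pvMarkers.any (fun m => m.isPrefixOf (c :: rest)) = true
    · rw [if_pos h]
      refine ⟨fun _ => ?_, fun _ => rfl⟩
      rcases List.any_eq_true.mp h with ⟨m, hm, hp⟩
      exact ⟨m, hm, (List.isPrefixOf_iff_prefix.mp hp).isInfix⟩
    · rw [if_neg h, ih]
      constructor
      · rintro ⟨m, hm, hinf⟩; exact ⟨m, hm, List.infix_cons_iff.mpr (Or.inr hinf)⟩
      · rintro ⟨m, hm, hinf⟩
        rcases (List.infix_cons_iff).mp hinf with hpre | hinf'
        · refine absurd ?_ h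
          exact List.any_eq_true.mpr ⟨m, hm, List.isPrefixOf_iff_prefix.mpr hpre⟩
        · exact ⟨m, hm, hinf'⟩

theorem pvLoopA_iff (ts : List String) (term : String) :
    pvLoopA ts term = true ↔ ∃ t ∈ ts, t.toList <:+: term.toList := by
  induction ts with
  | nil => simp [pvLoopA]
  | cons t rest ih =>
    unfold pvLoopA
    by_cases h : PySem.Str.isIn t term = true
    · rw [if_pos h]
      exact ⟨fun _ => ⟨t, by simp, (strIsIn_iff t term).mp h⟩, fun _ => rfl⟩
    · rw [if_neg h, ih]
      constructor
      · rintro ⟨u, hu, hi⟩; exact ⟨u, by simp [hu], hi⟩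
      · rintro ⟨u, hu, hi⟩
        rcases List.mem_cons.mp hu with rfl | hu'
        · exact absurd ((strIsIn_iff u term).mpr hi) h
        · exact ⟨u, hu', hi⟩

theorem check_if_url_iff (term : String) :
    check_if_url term = true ↔ ∃ m ∈ pvMarkers, m <:+: term.toList := by
  unfold check_if_url
  by_cases h : (PySem.Str.isIn "http" term || PySem.Str.isIn "www." term) = true
  · rw [if_pos h]
    refine ⟨fun _ => ?_, fun _ => rfl⟩
    rw [Bool.or_eq_true] at h
    rcases h with h1 | h1
    · exact ⟨"http".toList, by decide, (strIsIn_iff _ term).mp h1⟩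
    · exact ⟨"www.".toList, by decide, (strIsIn_iff _ term).mp h1⟩
  · rw [if_neg h, pvLoopA_iff]
    have hh : ¬ PySem.Str.isIn "http" term = true := fun hb => h (by rw [hb]; rfl)
    have hw : ¬ PySem.Str.isIn "www." term = true := fun hb =>
      h (by rw [hb, Bool.or_true])
    constructor
    · rintro ⟨t, ht, hi⟩
      fin_cases ht
      · exact ⟨".com".toList, by decide, hi⟩
      · exact ⟨".net".toList, by decide, hi⟩
      · exact ⟨".org".toList, by decide, hi⟩
      · exact ⟨".io".toList, by decide, hi⟩
      · exact ⟨".de".toList, by decide, hi⟩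
      · exact ⟨".uk".toList, by decide, hi⟩
      · exact ⟨".xyz".toList, by decide, hi⟩
      · exact ⟨".gov".toList, by decide, hi⟩
      · exact ⟨".tk".toList, by decide, hi⟩
      · exact ⟨".nl".toList, by decide, hi⟩
      · exact ⟨".ca".toList, by decide, hi⟩
      · exact ⟨".uk".toList, by decide, hi⟩
    · rintro ⟨m, hm, hi⟩
      fin_cases hm
      · exact absurd ((strIsIn_iff "http" term).mpr hi) hh
      · exact absurd ((strIsIn_iff "www." term).mpr hi) hw
      · exact ⟨".com", by decide, hi⟩
      · exact ⟨".net", by decide, hi⟩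
      · exact ⟨".org", by decide, hi⟩
      · exact ⟨".io", by decide, hi⟩
      · exact ⟨".de", by decide, hi⟩
      · exact ⟨".uk", by decide, hi⟩
      · exact ⟨".xyz", by decide, hi⟩
      · exact ⟨".gov", by decide, hi⟩
      · exact ⟨".tk", by decide, hi⟩
      · exact ⟨".nl", by decide, hi⟩
      · exact ⟨".ca", by decide, hi⟩

-- ===== VERDICT (by name: the statement is the Claim_ definition above) =====
theorem check_if_url_spec : Claim_equal_check_if_url := by
  intro term _
  unfold Spec_check_if_url check_if_url_alt
  exact Bool.eq_iff_iff.mpr ((check_if_url_iff term).trans (pvScanB_iff term.toList).symm)
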